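-- pv_equiv track=rewrite | github.com/robtaylor/VACASK | python/ng2vclib/m_file.py | remove_paired_parentheses_spaces
-- ===== SOURCE A (Python) =====
-- def remove_paired_parentheses_spaces(l):
--     """
--     Remove spaces from within paired parentheses.
--     """
--     stack = []
--     result = ""
--     for i, char in enumerate(l):
--         if char == '(':
--             stack.append(i)
--             continue
--         elif char == ')':
--             start = stack.pop()
--             if len(stack)==0:
--                 inner = l[start:i].replace(" ", "")
--                 result += inner + char
--             continue
--
--         if len(stack)==0:
--             result += char
--             continue
--
--     return result
-- ===== SOURCE B (Python) =====
-- def remove_paired_parentheses_spaces(l):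
--     """
--     Remove spaces from within paired parentheses.
--     """
--     out = []
--     i, n = 0, len(l)
--     while i < n:
--         if l[i] == '(':
--             j, depth = i + 1, 1
--             while j < n and depth:
--                 if l[j] == '(':
--                     depth += 1
--                 elif l[j] == ')':
--                     depth -= 1
--                 j += 1
--             if depth:  # unclosed group: everything from its '(' on is never emitted
--                 return ''.join(out)
--             out.append(l[i:j].replace(' ', ''))
--             i = j
--         else:
--             out.append(l[i])
--             i += 1
--     return ''.join(out)
-- ===== Notes on version B (the rewrite author's own statement) =====
-- stated objective: alternative
-- what changed: A walks every character once pushing indices on a stack and flushing on the closing paren; B scans forward for the matching close of each top-level '(' and emits the whole de-spaced slice in one step, copying ordinary characters directly.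
import Mathlib
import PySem

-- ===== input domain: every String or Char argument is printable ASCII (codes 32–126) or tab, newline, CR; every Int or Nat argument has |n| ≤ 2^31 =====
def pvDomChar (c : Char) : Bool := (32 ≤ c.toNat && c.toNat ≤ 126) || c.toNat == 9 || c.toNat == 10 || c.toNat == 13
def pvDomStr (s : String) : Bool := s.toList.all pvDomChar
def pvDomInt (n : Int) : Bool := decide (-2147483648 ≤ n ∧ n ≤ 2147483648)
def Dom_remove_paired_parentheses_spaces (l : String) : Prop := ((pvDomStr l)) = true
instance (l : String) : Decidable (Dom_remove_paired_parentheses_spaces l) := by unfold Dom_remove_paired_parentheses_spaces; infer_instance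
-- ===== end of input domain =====

-- B replaces A's index-stack single pass by a matching-scan that slices each
-- balanced top-level group out in one step (objective: alternative; same cost).

-- ===== PORT A =====
-- one loop iteration of A: state = some (stack, result); none once stack.pop() raised
def pvAStep (cs : List Char) (st : Option (List Int × List Char)) (p : Int × Char) :
    Option (List Int × List Char) :=
  match st with
  | none => none
  | some (stack, result) =>
    if p.2 = '(' then some (stack ++ [p.1], result)
    else if p.2 = ')' then
      match PySem.List.pop? stack (-1) with
      | none => none
      | some (start, stack') =>
        if stack'.length = 0 then
          some (stack', result ++
            PySem.Chars.replace (PySem.List.slice cs (some start) (some p.1)) [' '] [] ++ [p.2])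
        else some (stack', result)
    else if stack.length = 0 then some (stack, result ++ [p.2])
    else some (stack, result)

def remove_paired_parentheses_spaces (l : String) : String :=
  match (PySem.List.enumerate l.toList 0).foldl (pvAStep l.toList) (some ([], [])) with
  | some (_, result) => String.ofList result
  | none => ""   -- unreachable under Pre_: the Python raises IndexError here

-- ===== PORT B =====
-- inner while of B: scan for the close that brings `depth` to 0;
-- returns (consumed chunk incl. the ')', remainder), none if the group is unclosed
def pvScanClose : List Char → Nat → Option (List Char × List Char)
  | [], _ => none
  | c :: rest, depth =>
    let d := if c = '(' then depth + 1 else if c = ')' then depth - 1 else depth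
    if d = 0 then some ([c], rest)
    else
      match pvScanClose rest d with
      | none => none
      | some (chunk, rem) => some (c :: chunk, rem)

-- needed by pvBGo's decreasing_by
theorem pvScanClose_eq_append : ∀ (rest : List Char) (d : Nat) (chunk rem : List Char),
    pvScanClose rest d = some (chunk, rem) → rest = chunk ++ rem := by
  intro rest
  induction rest with
  | nil => intro d chunk rem h; simp [pvScanClose] at h
  | cons c t ih =>
    intro d chunk rem h
    simp only [pvScanClose] at h
    set d' := (if c = '(' then d + 1 else if c = ')' then d - 1 else d) with hd'
    by_cases hz : d' = 0
    · rw [if_pos hz] at h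
      simp at h
      simp [← h.1, ← h.2]
    · rw [if_neg hz] at h
      cases hrec : pvScanClose t d' with
      | none => rw [hrec] at h; simp at h
      | some pr =>
        obtain ⟨ck, rm⟩ := pr
        rw [hrec] at h
        simp at h
        have := ih d' ck rm hrec
        simp [← h.1, ← h.2, this]

-- outer while of B
def pvBGo : List Char → List Char
  | [] => []
  | c :: rest =>
    if c = '(' then
      match h : pvScanClose rest 1 with
      | none => []   -- unclosed group: everything from its '(' on is never emitted
      | some (chunk, rem) => PySem.Chars.replace (c :: chunk) [' '] [] ++ pvBGo rem
    else c :: pvBGo rest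
termination_by cs => cs.length
decreasing_by
  · have h2 := pvScanClose_eq_append rest 1 chunk rem h
    subst h2
    simp only [List.length_cons, List.length_append]
    omega
  · simp

def remove_paired_parentheses_spaces_alt (l : String) : String :=
  String.ofList (pvBGo l.toList)

-- ===== PRECONDITION & SPEC =====
-- Pre_ excludes exactly the strings with an unmatched ')' (a close at nesting
-- depth 0), on which the Python A raises IndexError from stack.pop().
def Pre_remove_paired_parentheses_spaces (l : String) : Prop :=
  ∀ i ∈ List.range (l.toList.length + 1),
    (l.toList.take i).count ')' ≤ (l.toList.take i).count '('
instance (l : String) : Decidable (Pre_remove_paired_parentheses_spaces l) := by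
  unfold Pre_remove_paired_parentheses_spaces; infer_instance

def pvWitness_remove_paired_parentheses_spaces : String := "a (b c) (d (e f) g) h"

def Spec_remove_paired_parentheses_spaces (l : String) (out : String) : Prop :=
  out = remove_paired_parentheses_spaces_alt l
instance (l : String) (out : String) : Decidable (Spec_remove_paired_parentheses_spaces l out) := by
  unfold Spec_remove_paired_parentheses_spaces; infer_instance

-- ===== CLAIM (what is proved, stated in full; the proofs are below) =====
def Claim_equal_remove_paired_parentheses_spaces : Prop :=
  ∀ (l : String), Dom_remove_paired_parentheses_spaces l →
    Pre_remove_paired_parentheses_spaces l →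
    Spec_remove_paired_parentheses_spaces l (remove_paired_parentheses_spaces l)

-- ===== LEMMAS AND PROOFS =====

-- str.replace(' ', '') is the space filter
theorem pvReplace_go_space : ∀ (fuel : Nat) (cs acc : List Char), cs.length ≤ fuel →
    PySem.Chars.replace.go [' '] [] fuel cs acc = acc.reverse ++ cs.filter (· ≠ ' ') := by
  intro fuel
  induction fuel with
  | zero =>
    intro cs acc h
    have : cs = [] := by cases cs <;> simp_all
    subst this; simp [PySem.Chars.replace.go]
  | succ n ih =>
    intro cs acc h
    cases cs with
    | nil => simp [PySem.Chars.replace.go]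
    | cons c t =>
      by_cases hc : c = ' '
      · subst hc
        rw [show PySem.Chars.replace.go [' '] [] (n+1) (' ' :: t) acc
              = PySem.Chars.replace.go [' '] [] n t acc by
            simp [PySem.Chars.replace.go, List.isPrefixOf]]
        rw [ih t acc (by simpa using h)]
        simp
      · rw [show PySem.Chars.replace.go [' '] [] (n+1) (c :: t) acc
              = PySem.Chars.replace.go [' '] [] n t (c :: acc) by
            simp [PySem.Chars.replace.go, List.isPrefixOf, Ne.symm hc]]
        rw [ih t (c :: acc) (by simpa using h)]
        simp [hc]

theorem pvReplace_space (cs : List Char) :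
    PySem.Chars.replace cs [' '] [] = cs.filter (· ≠ ' ') := by
  have h := pvReplace_go_space cs.length cs [] le_rfl
  simpa [PySem.Chars.replace] using h

-- a successful scan from positive depth ends in ')'
theorem pvScanClose_last : ∀ (rest : List Char) (d : Nat) (chunk rem : List Char), 0 < d →
    pvScanClose rest d = some (chunk, rem) → ∃ body, chunk = body ++ [')'] := by
  intro rest
  induction rest with
  | nil => intro d chunk rem hd h; simp [pvScanClose] at h
  | cons c t ih =>
    intro d chunk rem hd h
    simp only [pvScanClose] at h
    set d' := (if c = '(' then d + 1 else if c = ')' then d - 1 else d) with hd'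
    by_cases hz : d' = 0
    · have hc : c = ')' := by
        by_cases h1 : c = '(' <;> by_cases h2 : c = ')' <;> simp_all
      rw [if_pos hz] at h
      simp at h
      exact ⟨[], by simp [← h.1, hc]⟩
    · rw [if_neg hz] at h
      cases hrec : pvScanClose t d' with
      | none => rw [hrec] at h; simp at h
      | some pr =>
        obtain ⟨ck, rm⟩ := pr
        rw [hrec] at h
        simp at h
        obtain ⟨body, hb⟩ := ih d' ck rm (by omega) hrec
        exact ⟨c :: body, by simp [← h.1, hb]⟩

-- depth bookkeeping of a successful scan
theorem pvScanClose_count : ∀ (rest : List Char) (d : Nat) (chunk rem : List Char), 0 < d →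
    pvScanClose rest d = some (chunk, rem) → chunk.count ')' = chunk.count '(' + d := by
  intro rest
  induction rest with
  | nil => intro d chunk rem hd h; simp [pvScanClose] at h
  | cons c t ih =>
    intro d chunk rem hd h
    simp only [pvScanClose] at h
    set d' := (if c = '(' then d + 1 else if c = ')' then d - 1 else d) with hd'
    by_cases hz : d' = 0
    · have hc : c = ')' := by
        by_cases h1 : c = '(' <;> by_cases h2 : c = ')' <;> simp_all
      have hd1 : d = 1 := by
        subst hc; simp at hd'; omega
      rw [if_pos hz] at h
      simp at h
      simp [← h.1, hc, hd1]
    · rw [if_neg hz] at h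
      cases hrec : pvScanClose t d' with
      | none => rw [hrec] at h; simp at h
      | some pr =>
        obtain ⟨ck, rm⟩ := pr
        rw [hrec] at h
        simp at h
        have hcnt := ih d' ck rm (by omega) hrec
        by_cases h1 : c = '('
        · simp [h1] at hd'
          simp [← h.1, h1]
          omega
        · by_cases h2 : c = ')'
          · simp [h1, h2] at hd'
            simp [← h.1, h2]
            omega
          · simp [h1, h2] at hd'
            simp [← h.1, h1, h2]
            omega

-- A's fold across a group that DOES close: only the final ')' touches the result
theorem pvFoldA_in_some (cs : List Char) : ∀ (rest : List Char) (d : Nat) (chunk rem : List Char),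
    pvScanClose rest d = some (chunk, rem) →
    ∀ (j : Nat) (s0 : Int) (tl : List Int) (res : List Char), tl.length + 1 = d →
    (PySem.List.enumerate rest (j : Int)).foldl (pvAStep cs) (some (s0 :: tl, res)) =
    (PySem.List.enumerate rem ((j + chunk.length : Nat) : Int)).foldl (pvAStep cs)
      (some ([], res ++
        PySem.Chars.replace (PySem.List.slice cs (some s0) (some ((j + chunk.length - 1 : Nat) : Int))) [' '] [] ++ [')'])) := by
  intro rest
  induction rest with
  | nil => intro d chunk rem h; simp [pvScanClose] at h
  | cons c t ih =>
    intro d chunk rem h j s0 tl res hlen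
    simp only [pvScanClose] at h
    set d' := (if c = '(' then d + 1 else if c = ')' then d - 1 else d) with hd'
    rw [PySem.List.enumerate_cons, List.foldl_cons]
    by_cases hz : d' = 0
    · -- c = ')' and d = 1: the flush step
      have hc : c = ')' := by
        by_cases h1 : c = '(' <;> by_cases h2 : c = ')' <;> simp_all <;> omega
      have hd1 : d = 1 := by
        subst hc; simp at hd'; omega
      have htl : tl = [] := by
        cases tl <;> simp_all
      rw [if_pos hz] at h
      simp at h
      subst hc htl
      have hpop : PySem.List.pop? [s0] (-1) = some (s0, ([] : List Int)) := by
        simpa using PySem.List.pop?_last ([] : List Int) s0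
      have hstep : pvAStep cs (some ([s0], res)) ((j : Int), ')') =
          some ([], res ++
            PySem.Chars.replace (PySem.List.slice cs (some s0) (some (j : Int))) [' '] [] ++ [')']) := by
        simp only [pvAStep]
        rw [hpop]
        simp
      obtain ⟨hchunk, hrem⟩ := h
      subst hchunk
      subst hrem
      rw [hstep]
      have e1 : ((j : Int) + 1) = ((j + 1 : Nat) : Int) := by push_cast; ring
      have e2 : (j + List.length [')'] : Nat) = j + 1 := by simp
      have e3 : (j + 1 - 1 : Nat) = j := by simp
      rw [e2, e3, e1]
    · rw [if_neg hz] at h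
      cases hrec : pvScanClose t d' with
      | none => rw [hrec] at h; simp at h
      | some pr =>
        obtain ⟨ck, rm⟩ := pr
        rw [hrec] at h
        simp at h
        obtain ⟨hchunk, hrem⟩ := h
        subst hrem
        by_cases h1 : c = '('
        · -- push step
          subst h1
          have hstep : pvAStep cs (some (s0 :: tl, res)) ((j : Int), '(') =
              some (s0 :: (tl ++ [(j : Int)]), res) := by
            simp only [pvAStep]
            simp
          rw [hstep]
          have e1 : ((j : Int) + 1) = ((j + 1 : Nat) : Int) := by push_cast; ring
          rw [e1, ih d' ck rm hrec (j + 1) s0 (tl ++ [(j : Int)]) res (by simp [hd']; omega)]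
          have e2 : j + 1 + ck.length = j + chunk.length := by simp [← hchunk]; omega
          rw [e2]
        · by_cases h2 : c = ')'
          · -- pop step, stack stays nonempty (d ≥ 2)
            subst h2
            simp [h1] at hd'
            have hd2 : 2 ≤ d := by omega
            rcases tl.eq_nil_or_concat with htl | ⟨tl', x, htl⟩
            · subst htl; simp at hlen; omega
            · subst htl
              simp only [List.concat_eq_append]
              have hpop : PySem.List.pop? (s0 :: (tl' ++ [x])) (-1) = some (x, s0 :: tl') := by
                simpa using PySem.List.pop?_last (s0 :: tl') x
              have hstep : pvAStep cs (some (s0 :: (tl' ++ [x]), res)) ((j : Int), ')') =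
                  some (s0 :: tl', res) := by
                simp only [pvAStep]
                rw [hpop]
                simp
              rw [hstep]
              have e1 : ((j : Int) + 1) = ((j + 1 : Nat) : Int) := by push_cast; ring
              rw [e1, ih d' ck rm hrec (j + 1) s0 tl' res (by simp at hlen ⊢; omega)]
              have e2 : j + 1 + ck.length = j + chunk.length := by simp [← hchunk]; omega
              rw [e2]
          · -- ordinary char inside the group: nothing changes
            have hstep : pvAStep cs (some (s0 :: tl, res)) ((j : Int), c) =
                some (s0 :: tl, res) := by
              simp only [pvAStep]
              simp [h1, h2]
            rw [hstep]
            have e1 : ((j : Int) + 1) = ((j + 1 : Nat) : Int) := by push_cast; ring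
            simp [h1, h2] at hd'
            rw [e1, ih d' ck rm hrec (j + 1) s0 tl res (by omega)]
            have e2 : j + 1 + ck.length = j + chunk.length := by simp [← hchunk]; omega
            rw [e2]

-- A's fold across a group that does NOT close: the result is untouched to the end
theorem pvFoldA_in_none (cs : List Char) : ∀ (rest : List Char) (d : Nat),
    pvScanClose rest d = none →
    ∀ (j : Int) (s0 : Int) (tl : List Int) (res : List Char), tl.length + 1 = d →
    ∃ st, (PySem.List.enumerate rest j).foldl (pvAStep cs) (some (s0 :: tl, res)) = some (st, res) := by
  intro rest
  induction rest with
  | nil => intro d hscan j s0 tl res hlen; exact ⟨s0 :: tl, by simp⟩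
  | cons c t ih =>
    intro d hscan j s0 tl res hlen
    simp only [pvScanClose] at hscan
    set d' := (if c = '(' then d + 1 else if c = ')' then d - 1 else d) with hd'
    by_cases hz : d' = 0
    · rw [if_pos hz] at hscan; simp at hscan
    · rw [if_neg hz] at hscan
      cases hrec : pvScanClose t d' with
      | some pr => rw [hrec] at hscan; simp at hscan
      | none =>
        rw [PySem.List.enumerate_cons, List.foldl_cons]
        by_cases h1 : c = '('
        · subst h1
          have hstep : pvAStep cs (some (s0 :: tl, res)) (j, '(') =
              some (s0 :: (tl ++ [j]), res) := by
            simp only [pvAStep]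
            simp
          rw [hstep]
          exact ih d' hrec (j + 1) s0 (tl ++ [j]) res (by simp [hd']; omega)
        · by_cases h2 : c = ')'
          · subst h2
            simp [h1] at hd'
            rcases tl.eq_nil_or_concat with htl | ⟨tl', x, htl⟩
            · subst htl; simp at hlen; omega
            · subst htl
              simp only [List.concat_eq_append]
              have hpop : PySem.List.pop? (s0 :: (tl' ++ [x])) (-1) = some (x, s0 :: tl') := by
                simpa using PySem.List.pop?_last (s0 :: tl') x
              have hstep : pvAStep cs (some (s0 :: (tl' ++ [x]), res)) (j, ')') =
                  some (s0 :: tl', res) := by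
                simp only [pvAStep]
                rw [hpop]
                simp
              rw [hstep]
              exact ih d' hrec (j + 1) s0 tl' res (by simp at hlen ⊢; omega)
          · have hstep : pvAStep cs (some (s0 :: tl, res)) (j, c) =
                some (s0 :: tl, res) := by
              simp only [pvAStep]
              simp [h1, h2]
            rw [hstep]
            simp [h1, h2] at hd'
            exact ih d' hrec (j + 1) s0 tl res (by omega)

-- unfolding pvBGo on a '(' head
theorem pvBGo_paren_some (rest chunk rem : List Char) (h : pvScanClose rest 1 = some (chunk, rem)) :
    pvBGo ('(' :: rest) = PySem.Chars.replace ('(' :: chunk) [' '] [] ++ pvBGo rem := by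
  rw [pvBGo]
  split
  · split <;> simp_all
  · simp_all

theorem pvBGo_paren_none (rest : List Char) (h : pvScanClose rest 1 = none) :
    pvBGo ('(' :: rest) = [] := by
  rw [pvBGo]
  split
  · split <;> simp_all
  · simp_all

theorem pvBGo_other (c : Char) (rest : List Char) (h : c ≠ '(') :
    pvBGo (c :: rest) = c :: pvBGo rest := by
  rw [pvBGo]
  simp [h]

-- main invariant: A's fold at depth 0 produces exactly pvBGo of the remaining input
theorem pvFoldA_main (cs : List Char)
    (hbal : ∀ i, i ≤ cs.length → (cs.take i).count ')' ≤ (cs.take i).count '(') :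
    ∀ (k : Nat) (rest : List Char) (n : Nat) (res : List Char), rest.length ≤ k →
    cs.drop n = rest → (cs.take n).count '(' = (cs.take n).count ')' →
    ∃ st, (PySem.List.enumerate rest (n : Int)).foldl (pvAStep cs) (some ([], res))
            = some (st, res ++ pvBGo rest) := by
  intro k
  induction k with
  | zero =>
    intro rest n res hk hdrop hcnt
    have : rest = [] := by cases rest <;> simp_all
    subst this
    exact ⟨[], by simp [pvBGo]⟩
  | succ k ih =>
    intro rest n res hk hdrop hcnt
    cases rest with
    | nil => exact ⟨[], by simp [pvBGo]⟩
    | cons c t =>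
      have hn : n < cs.length := by
        rcases Nat.lt_or_ge n cs.length with hlt | hge
        · exact hlt
        · rw [List.drop_eq_nil_of_le hge] at hdrop; cases hdrop
      have hget : cs[n]? = some c := by
        have h0 : (cs.drop n)[0]? = some c := by rw [hdrop]; rfl
        rw [List.getElem?_drop] at h0
        simpa using h0
      have htake1 : cs.take (n + 1) = cs.take n ++ [c] := by
        rw [List.take_succ, hget]
        rfl
      rw [PySem.List.enumerate_cons, List.foldl_cons]
      by_cases h1 : c = '('
      · subst h1
        have hstep : pvAStep cs (some ([], res)) ((n : Int), '(') = some ([(n : Int)], res) := by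
          simp [pvAStep]
        rw [hstep]
        have e1 : ((n : Int) + 1) = ((n + 1 : Nat) : Int) := by push_cast; ring
        rw [e1]
        cases hscan : pvScanClose t 1 with
        | none =>
          obtain ⟨st, hst⟩ := pvFoldA_in_none cs t 1 hscan ((n + 1 : Nat) : Int) (n : Int) [] res rfl
          exact ⟨st, by rw [hst, pvBGo_paren_none t hscan]; simp⟩
        | some pr =>
          obtain ⟨chunk, rem⟩ := pr
          obtain ⟨body, hbody⟩ := pvScanClose_last t 1 chunk rem (by omega) hscan
          have happ : t = chunk ++ rem := pvScanClose_eq_append t 1 chunk rem hscan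
          have hcnt2 : chunk.count ')' = chunk.count '(' + 1 := pvScanClose_count t 1 chunk rem (by omega) hscan
          rw [pvFoldA_in_some cs t 1 chunk rem hscan (n + 1) (n : Int) [] res rfl]
          -- compute the slice: cs[n : n + 1 + |chunk| - 1] = '(' :: body
          have hdrop1 : cs.drop n = '(' :: (body ++ [')'] ++ rem) := by
            rw [hdrop, happ, hbody]
          have hchunklen : chunk.length = body.length + 1 := by simp [hbody]
          have hsl : PySem.List.slice cs (some (n : Int)) (some ((n + 1 + chunk.length - 1 : Nat) : Int)) =
              '(' :: body := by
            rw [PySem.List.slice_natCast]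
            have e : n + 1 + chunk.length - 1 - n = chunk.length := by omega
            rw [e, hdrop1, hchunklen]
            simp
          rw [hsl]
          -- recurse after the group
          have hdropt : cs.drop (n + 1) = t := by
            have h5 : List.drop 1 (List.drop n cs) = List.drop (n + 1) cs := List.drop_drop
            rw [← h5, hdrop]
            rfl
          have hdrop2 : cs.drop (n + 1 + chunk.length) = rem := by
            have h5 : List.drop chunk.length (List.drop (n + 1) cs) = List.drop (n + 1 + chunk.length) cs :=
              List.drop_drop
            rw [← h5, hdropt, happ, List.drop_left]
          have htake2 : cs.take (n + 1 + chunk.length) = cs.take (n + 1) ++ chunk := by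
            rw [List.take_add]
            congr 1
            rw [hdropt, happ, List.take_left]
          have hcnt3 : (cs.take (n + 1 + chunk.length)).count '(' = (cs.take (n + 1 + chunk.length)).count ')' := by
            rw [htake2, htake1]
            simp [List.count_append]
            omega
          have hrem : rem.length ≤ k := by
            have : t.length ≤ k := by simpa using hk
            rw [happ] at this
            simp at this
            omega
          obtain ⟨st, hst⟩ := ih rem (n + 1 + chunk.length) (res ++ (PySem.Chars.replace ('(' :: body) [' '] [] ++ [')'])) hrem hdrop2 hcnt3
          refine ⟨st, ?_⟩
          rw [show ((n + 1 + chunk.length : Nat) : Int) = ((n + 1) + chunk.length : Nat) by norm_num] at hst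
          rw [← List.append_assoc] at hst
          rw [hst, pvBGo_paren_some t chunk rem hscan]
          rw [hbody, pvReplace_space, pvReplace_space]
          simp
      · by_cases h2 : c = ')'
        · -- impossible under the balance precondition
          exfalso
          subst h2
          have hb := hbal (n + 1) (by omega)
          rw [htake1] at hb
          simp [List.count_append] at hb
          omega
        · -- top-level ordinary char: appended directly
          have hstep : pvAStep cs (some ([], res)) ((n : Int), c) = some ([], res ++ [c]) := by
            simp [pvAStep, h1, h2]
          rw [hstep]
          have e1 : ((n : Int) + 1) = ((n + 1 : Nat) : Int) := by push_cast; ring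
          rw [e1]
          have hdropt : cs.drop (n + 1) = t := by
            have h5 : List.drop 1 (List.drop n cs) = List.drop (n + 1) cs := List.drop_drop
            rw [← h5, hdrop]
            rfl
          have hcnt' : (cs.take (n + 1)).count '(' = (cs.take (n + 1)).count ')' := by
            rw [htake1]
            simp [List.count_append, h1, h2]
            omega
          obtain ⟨st, hst⟩ := ih t (n + 1) (res ++ [c]) (by simpa using hk) hdropt hcnt'
          exact ⟨st, by rw [hst, pvBGo_other c t h1]; simp⟩

-- ===== VERDICT (by name: the statement is the Claim_ definition above) =====
theorem remove_paired_parentheses_spaces_spec : Claim_equal_remove_paired_parentheses_spaces := by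
  intro l _hdom hpre
  unfold Spec_remove_paired_parentheses_spaces
  have hbal : ∀ i, i ≤ l.toList.length → (l.toList.take i).count ')' ≤ (l.toList.take i).count '(' := by
    intro i hi
    exact hpre i (List.mem_range.mpr (by omega))
  obtain ⟨st, hfold⟩ := pvFoldA_main l.toList hbal l.toList.length l.toList 0 [] le_rfl (by simp) (by simp)
  unfold remove_paired_parentheses_spaces remove_paired_parentheses_spaces_alt
  rw [show ((0 : Int)) = ((0 : Nat) : Int) by simp, hfold]
  simp
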